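-- pv_equiv track=rewrite | github.com/malakfbebawy/Malak-Fahim-s-projects- | Identify Shapes/feature_extractor.py | getSegmentsOfPoints
-- ===== SOURCE A (Python) =====
-- def betweenTwoPoints(minX, minY, maxX, maxY, point):
-- 	return minX < point[0] < maxX and minY < point[1] < maxY
--
-- def getSegmentsOfPoints(rows, columns, leftmost, rightmost, upper, lower):
-- 	# between upper and rightmost
-- 	rightUpperLine = [(columns[i], rows[i]) for i in range(len(columns)) if
-- 		   betweenTwoPoints(minX=upper[0], minY=upper[1], maxX=rightmost[0], maxY=rightmost[1],
-- 							point=(columns[i], rows[i]))]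
-- 	# between upper and leftmost
-- 	leftUpperLine = [(columns[i], rows[i]) for i in range(len(columns)) if
-- 		   betweenTwoPoints(minX=leftmost[0], minY=upper[1], maxX=upper[0], maxY=leftmost[1],
-- 							point=(columns[i], rows[i]))]
-- 	# between leftmost and lower
-- 	leftLowerLine = [(columns[i], rows[i]) for i in range(len(columns)) if
-- 		   betweenTwoPoints(minX=leftmost[0], minY=leftmost[1], maxX=lower[0], maxY=lower[1],
-- 							point=(columns[i], rows[i]))]
-- 	# between lower and rightmost
-- 	rightLowerLine = [(columns[i], rows[i]) for i in range(len(columns)) if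
-- 		   betweenTwoPoints(minX=lower[0], minY=rightmost[1], maxX=rightmost[0], maxY=lower[1],
-- 							point=(columns[i], rows[i]))]
-- 	return rightUpperLine, leftUpperLine, leftLowerLine, rightLowerLine
-- ===== SOURCE B (Python) =====
-- def getSegmentsOfPoints(rows, columns, leftmost, rightmost, upper, lower):
--     rightUpperLine, leftUpperLine, leftLowerLine, rightLowerLine = [], [], [], []
--     for i in range(len(columns)):
--         p = (columns[i], rows[i])
--         x, y = p
--         if upper[0] < x < rightmost[0] and upper[1] < y < rightmost[1]:
--             rightUpperLine.append(p)
--         if leftmost[0] < x < upper[0] and upper[1] < y < leftmost[1]: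
--             leftUpperLine.append(p)
--         if leftmost[0] < x < lower[0] and leftmost[1] < y < lower[1]:
--             leftLowerLine.append(p)
--         if lower[0] < x < rightmost[0] and rightmost[1] < y < lower[1]:
--             rightLowerLine.append(p)
--     return rightUpperLine, leftUpperLine, leftLowerLine, rightLowerLine
-- ===== Notes on version B (the rewrite author's own statement) =====
-- stated objective: faster
-- what changed: Replaces four separate list-comprehension passes (each re-reading columns[i]/rows[i] and calling betweenTwoPoints) with one loop over the indices that builds each point once and appends it to whichever of the four segment lists its inlined bounding-box test admits.
import Mathlib
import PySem

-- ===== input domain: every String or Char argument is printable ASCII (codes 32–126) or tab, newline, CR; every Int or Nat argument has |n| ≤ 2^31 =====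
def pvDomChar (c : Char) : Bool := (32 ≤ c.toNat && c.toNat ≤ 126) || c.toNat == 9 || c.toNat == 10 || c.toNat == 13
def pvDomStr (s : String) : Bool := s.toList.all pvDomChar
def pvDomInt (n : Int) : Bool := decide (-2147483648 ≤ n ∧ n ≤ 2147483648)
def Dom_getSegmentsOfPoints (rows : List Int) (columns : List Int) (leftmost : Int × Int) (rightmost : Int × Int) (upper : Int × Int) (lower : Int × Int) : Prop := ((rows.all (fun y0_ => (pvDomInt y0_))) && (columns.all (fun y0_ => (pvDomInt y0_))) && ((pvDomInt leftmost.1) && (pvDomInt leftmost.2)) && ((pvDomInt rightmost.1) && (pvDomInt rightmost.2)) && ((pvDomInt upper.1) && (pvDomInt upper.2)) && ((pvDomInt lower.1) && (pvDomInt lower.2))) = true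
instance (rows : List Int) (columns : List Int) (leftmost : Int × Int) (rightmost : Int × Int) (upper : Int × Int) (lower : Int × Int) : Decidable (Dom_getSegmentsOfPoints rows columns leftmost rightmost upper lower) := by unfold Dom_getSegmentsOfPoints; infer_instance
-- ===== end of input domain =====

-- ===== PORT A =====
-- B changes: one pass over the indices building each point once, with the four
-- bounding-box tests inlined, instead of A's four separate comprehension passes.

def betweenTwoPoints (minX : Int) (minY : Int) (maxX : Int) (maxY : Int) (point : Int × Int) : Bool :=
  (minX < point.1 && point.1 < maxX) && (minY < point.2 && point.2 < maxY)

-- columns[i], rows[i]; under Pre_ the indices are in range, so the getD 0 default is never taken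
def pvPoint (rows : List Int) (columns : List Int) (i : Int) : Int × Int :=
  ((PySem.List.pyGet? columns i).getD 0, (PySem.List.pyGet? rows i).getD 0)

def getSegmentsOfPoints (rows : List Int) (columns : List Int) (leftmost : Int × Int) (rightmost : Int × Int) (upper : Int × Int) (lower : Int × Int) : (List (Int × Int)) × (List (Int × Int)) × (List (Int × Int)) × (List (Int × Int)) :=
  let idxs := PySem.List.pyRange 0 (columns.length : Int) 1
  let rightUpperLine := (idxs.filter (fun i => betweenTwoPoints upper.1 upper.2 rightmost.1 rightmost.2 (pvPoint rows columns i))).map (pvPoint rows columns)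
  let leftUpperLine := (idxs.filter (fun i => betweenTwoPoints leftmost.1 upper.2 upper.1 leftmost.2 (pvPoint rows columns i))).map (pvPoint rows columns)
  let leftLowerLine := (idxs.filter (fun i => betweenTwoPoints leftmost.1 leftmost.2 lower.1 lower.2 (pvPoint rows columns i))).map (pvPoint rows columns)
  let rightLowerLine := (idxs.filter (fun i => betweenTwoPoints lower.1 rightmost.2 rightmost.1 lower.2 (pvPoint rows columns i))).map (pvPoint rows columns)
  (rightUpperLine, leftUpperLine, leftLowerLine, rightLowerLine)

-- ===== PORT B =====
-- the single for-loop of Source B: a fold over the indices carrying the four segment lists,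
-- appending the point (columns[i], rows[i]) under each inlined bounding-box test
def getSegmentsOfPoints_alt (rows : List Int) (columns : List Int) (leftmost : Int × Int) (rightmost : Int × Int) (upper : Int × Int) (lower : Int × Int) : (List (Int × Int)) × (List (Int × Int)) × (List (Int × Int)) × (List (Int × Int)) :=
  (PySem.List.pyRange 0 (columns.length : Int) 1).foldl
    (fun s i =>
      (if (upper.1 < (PySem.List.pyGet? columns i).getD 0 && (PySem.List.pyGet? columns i).getD 0 < rightmost.1) && (upper.2 < (PySem.List.pyGet? rows i).getD 0 && (PySem.List.pyGet? rows i).getD 0 < rightmost.2) then s.1 ++ [((PySem.List.pyGet? columns i).getD 0, (PySem.List.pyGet? rows i).getD 0)] else s.1,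
       (if (leftmost.1 < (PySem.List.pyGet? columns i).getD 0 && (PySem.List.pyGet? columns i).getD 0 < upper.1) && (upper.2 < (PySem.List.pyGet? rows i).getD 0 && (PySem.List.pyGet? rows i).getD 0 < leftmost.2) then s.2.1 ++ [((PySem.List.pyGet? columns i).getD 0, (PySem.List.pyGet? rows i).getD 0)] else s.2.1,
        (if (leftmost.1 < (PySem.List.pyGet? columns i).getD 0 && (PySem.List.pyGet? columns i).getD 0 < lower.1) && (leftmost.2 < (PySem.List.pyGet? rows i).getD 0 && (PySem.List.pyGet? rows i).getD 0 < lower.2) then s.2.2.1 ++ [((PySem.List.pyGet? columns i).getD 0, (PySem.List.pyGet? rows i).getD 0)] else s.2.2.1,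
         if (lower.1 < (PySem.List.pyGet? columns i).getD 0 && (PySem.List.pyGet? columns i).getD 0 < rightmost.1) && (rightmost.2 < (PySem.List.pyGet? rows i).getD 0 && (PySem.List.pyGet? rows i).getD 0 < lower.2) then s.2.2.2 ++ [((PySem.List.pyGet? columns i).getD 0, (PySem.List.pyGet? rows i).getD 0)] else s.2.2.2))))
    ([], [], [], [])

-- ===== PRECONDITION & SPEC =====
-- A raises IndexError (rows[i]) exactly when rows is shorter than columns; those inputs are excluded.
def Pre_getSegmentsOfPoints (rows : List Int) (columns : List Int) (leftmost : Int × Int) (rightmost : Int × Int) (upper : Int × Int) (lower : Int × Int) : Prop :=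
  columns.length ≤ rows.length
instance (rows : List Int) (columns : List Int) (leftmost : Int × Int) (rightmost : Int × Int) (upper : Int × Int) (lower : Int × Int) : Decidable (Pre_getSegmentsOfPoints rows columns leftmost rightmost upper lower) := by unfold Pre_getSegmentsOfPoints; infer_instance

def pvWitness_getSegmentsOfPoints : List Int × List Int × (Int × Int) × (Int × Int) × (Int × Int) × (Int × Int) :=
  ([1, 2], [2, 0], (0, 5), (5, 0), (1, 1), (3, 3))

def Spec_getSegmentsOfPoints (rows : List Int) (columns : List Int) (leftmost : Int × Int) (rightmost : Int × Int) (upper : Int × Int) (lower : Int × Int) (out : (List (Int × Int)) × (List (Int × Int)) × (List (Int × Int)) × (List (Int × Int))) : Prop := out = getSegmentsOfPoints_alt rows columns leftmost rightmost upper lower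
instance (rows : List Int) (columns : List Int) (leftmost : Int × Int) (rightmost : Int × Int) (upper : Int × Int) (lower : Int × Int) (out : (List (Int × Int)) × (List (Int × Int)) × (List (Int × Int)) × (List (Int × Int))) : Decidable (Spec_getSegmentsOfPoints rows columns leftmost rightmost upper lower out) := by unfold Spec_getSegmentsOfPoints; infer_instance

-- ===== CLAIM (what is proved, stated in full; the proofs are below) =====
def Claim_equal_getSegmentsOfPoints : Prop := ∀ (rows : List Int) (columns : List Int) (leftmost : Int × Int) (rightmost : Int × Int) (upper : Int × Int) (lower : Int × Int), Dom_getSegmentsOfPoints rows columns leftmost rightmost upper lower → Pre_getSegmentsOfPoints rows columns leftmost rightmost upper lower → Spec_getSegmentsOfPoints rows columns leftmost rightmost upper lower (getSegmentsOfPoints rows columns leftmost rightmost upper lower)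

-- ===== LEMMAS AND PROOFS =====
theorem pvWitness_ok :
    Dom_getSegmentsOfPoints (pvWitness_getSegmentsOfPoints.1) (pvWitness_getSegmentsOfPoints.2.1) (pvWitness_getSegmentsOfPoints.2.2.1) (pvWitness_getSegmentsOfPoints.2.2.2.1) (pvWitness_getSegmentsOfPoints.2.2.2.2.1) (pvWitness_getSegmentsOfPoints.2.2.2.2.2) ∧
    Pre_getSegmentsOfPoints (pvWitness_getSegmentsOfPoints.1) (pvWitness_getSegmentsOfPoints.2.1) (pvWitness_getSegmentsOfPoints.2.2.1) (pvWitness_getSegmentsOfPoints.2.2.2.1) (pvWitness_getSegmentsOfPoints.2.2.2.2.1) (pvWitness_getSegmentsOfPoints.2.2.2.2.2) := by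
  decide

-- B's four-accumulator fold splits into four independent folds, each an append-if fold
theorem alt_eq (rows columns : List Int) (leftmost rightmost upper lower : Int × Int) :
    getSegmentsOfPoints_alt rows columns leftmost rightmost upper lower =
      getSegmentsOfPoints rows columns leftmost rightmost upper lower := by
  unfold getSegmentsOfPoints_alt getSegmentsOfPoints
  rw [PySem.List.foldl_prod_mk
        (f := fun (a : List (Int × Int)) (i : Int) => if (upper.1 < (PySem.List.pyGet? columns i).getD 0 && (PySem.List.pyGet? columns i).getD 0 < rightmost.1) && (upper.2 < (PySem.List.pyGet? rows i).getD 0 && (PySem.List.pyGet? rows i).getD 0 < rightmost.2) then a ++ [((PySem.List.pyGet? columns i).getD 0, (PySem.List.pyGet? rows i).getD 0)] else a)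
        (g := fun (t : (List (Int × Int)) × (List (Int × Int)) × (List (Int × Int))) (i : Int) =>
          (if (leftmost.1 < (PySem.List.pyGet? columns i).getD 0 && (PySem.List.pyGet? columns i).getD 0 < upper.1) && (upper.2 < (PySem.List.pyGet? rows i).getD 0 && (PySem.List.pyGet? rows i).getD 0 < leftmost.2) then t.1 ++ [((PySem.List.pyGet? columns i).getD 0, (PySem.List.pyGet? rows i).getD 0)] else t.1,
           (if (leftmost.1 < (PySem.List.pyGet? columns i).getD 0 && (PySem.List.pyGet? columns i).getD 0 < lower.1) && (leftmost.2 < (PySem.List.pyGet? rows i).getD 0 && (PySem.List.pyGet? rows i).getD 0 < lower.2) then t.2.1 ++ [((PySem.List.pyGet? columns i).getD 0, (PySem.List.pyGet? rows i).getD 0)] else t.2.1,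
            if (lower.1 < (PySem.List.pyGet? columns i).getD 0 && (PySem.List.pyGet? columns i).getD 0 < rightmost.1) && (rightmost.2 < (PySem.List.pyGet? rows i).getD 0 && (PySem.List.pyGet? rows i).getD 0 < lower.2) then t.2.2 ++ [((PySem.List.pyGet? columns i).getD 0, (PySem.List.pyGet? rows i).getD 0)] else t.2.2)))]
  rw [PySem.List.foldl_prod_mk
        (f := fun (a : List (Int × Int)) (i : Int) => if (leftmost.1 < (PySem.List.pyGet? columns i).getD 0 && (PySem.List.pyGet? columns i).getD 0 < upper.1) && (upper.2 < (PySem.List.pyGet? rows i).getD 0 && (PySem.List.pyGet? rows i).getD 0 < leftmost.2) then a ++ [((PySem.List.pyGet? columns i).getD 0, (PySem.List.pyGet? rows i).getD 0)] else a)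
        (g := fun (t : (List (Int × Int)) × (List (Int × Int))) (i : Int) =>
          (if (leftmost.1 < (PySem.List.pyGet? columns i).getD 0 && (PySem.List.pyGet? columns i).getD 0 < lower.1) && (leftmost.2 < (PySem.List.pyGet? rows i).getD 0 && (PySem.List.pyGet? rows i).getD 0 < lower.2) then t.1 ++ [((PySem.List.pyGet? columns i).getD 0, (PySem.List.pyGet? rows i).getD 0)] else t.1,
           if (lower.1 < (PySem.List.pyGet? columns i).getD 0 && (PySem.List.pyGet? columns i).getD 0 < rightmost.1) && (rightmost.2 < (PySem.List.pyGet? rows i).getD 0 && (PySem.List.pyGet? rows i).getD 0 < lower.2) then t.2 ++ [((PySem.List.pyGet? columns i).getD 0, (PySem.List.pyGet? rows i).getD 0)] else t.2))]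
  rw [PySem.List.foldl_prod_mk
        (f := fun (a : List (Int × Int)) (i : Int) => if (leftmost.1 < (PySem.List.pyGet? columns i).getD 0 && (PySem.List.pyGet? columns i).getD 0 < lower.1) && (leftmost.2 < (PySem.List.pyGet? rows i).getD 0 && (PySem.List.pyGet? rows i).getD 0 < lower.2) then a ++ [((PySem.List.pyGet? columns i).getD 0, (PySem.List.pyGet? rows i).getD 0)] else a)
        (g := fun (a : List (Int × Int)) (i : Int) => if (lower.1 < (PySem.List.pyGet? columns i).getD 0 && (PySem.List.pyGet? columns i).getD 0 < rightmost.1) && (rightmost.2 < (PySem.List.pyGet? rows i).getD 0 && (PySem.List.pyGet? rows i).getD 0 < lower.2) then a ++ [((PySem.List.pyGet? columns i).getD 0, (PySem.List.pyGet? rows i).getD 0)] else a)]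
  rw [PySem.List.foldl_append_if (p := fun i => (upper.1 < (PySem.List.pyGet? columns i).getD 0 && (PySem.List.pyGet? columns i).getD 0 < rightmost.1) && (upper.2 < (PySem.List.pyGet? rows i).getD 0 && (PySem.List.pyGet? rows i).getD 0 < rightmost.2)) (f := fun i => ((PySem.List.pyGet? columns i).getD 0, (PySem.List.pyGet? rows i).getD 0)),
      PySem.List.foldl_append_if (p := fun i => (leftmost.1 < (PySem.List.pyGet? columns i).getD 0 && (PySem.List.pyGet? columns i).getD 0 < upper.1) && (upper.2 < (PySem.List.pyGet? rows i).getD 0 && (PySem.List.pyGet? rows i).getD 0 < leftmost.2)) (f := fun i => ((PySem.List.pyGet? columns i).getD 0, (PySem.List.pyGet? rows i).getD 0)),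
      PySem.List.foldl_append_if (p := fun i => (leftmost.1 < (PySem.List.pyGet? columns i).getD 0 && (PySem.List.pyGet? columns i).getD 0 < lower.1) && (leftmost.2 < (PySem.List.pyGet? rows i).getD 0 && (PySem.List.pyGet? rows i).getD 0 < lower.2)) (f := fun i => ((PySem.List.pyGet? columns i).getD 0, (PySem.List.pyGet? rows i).getD 0)),
      PySem.List.foldl_append_if (p := fun i => (lower.1 < (PySem.List.pyGet? columns i).getD 0 && (PySem.List.pyGet? columns i).getD 0 < rightmost.1) && (rightmost.2 < (PySem.List.pyGet? rows i).getD 0 && (PySem.List.pyGet? rows i).getD 0 < lower.2)) (f := fun i => ((PySem.List.pyGet? columns i).getD 0, (PySem.List.pyGet? rows i).getD 0))]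
  rfl

-- ===== VERDICT (by name: the statement is the Claim_ definition above) =====
theorem getSegmentsOfPoints_spec : Claim_equal_getSegmentsOfPoints := by
  intro rows columns leftmost rightmost upper lower _ _
  unfold Spec_getSegmentsOfPoints
  exact (alt_eq rows columns leftmost rightmost upper lower).symm
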